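-- pv_equiv track=rewrite | github.com/Rofutok112/raythm | tools/chart_ml/src/chart_ml/timing.py | _build_ln_candidate_end_ticks
-- ===== SOURCE A (Python) =====
-- from bisect import bisect_left
--
-- def _build_ln_candidate_end_ticks(event_ticks: list[int], resolution: int) -> list[list[int]]:
--     candidates_by_event: list[list[int]] = []
--     if not event_ticks:
--         return candidates_by_event
--
--     for tick in event_ticks:
--         candidate_targets = [tick + resolution // 2, tick + resolution, tick + resolution * 2, tick + resolution * 4]
--         lane_candidates: list[int] = []
--         for target in candidate_targets:
--             index = bisect_left(event_ticks, target)
--             if index >= len(event_ticks):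
--                 continue
--             candidate_tick = event_ticks[index]
--             if candidate_tick > tick and candidate_tick not in lane_candidates:
--                 lane_candidates.append(candidate_tick)
--         candidates_by_event.append(lane_candidates)
--     return candidates_by_event
-- ===== SOURCE B (Python) =====
-- def _build_ln_candidate_end_ticks(event_ticks: list[int], resolution: int) -> list[list[int]]:
--     n = len(event_ticks)
--     offsets = (resolution // 2, resolution, resolution * 2, resolution * 4)
--
--     def locate(target: int, lo: int, hi: int) -> int:
--         # recursive divide-and-conquer insertion-point search on [lo, hi)
--         if lo >= hi:
--             return lo
--         mid = (lo + hi) // 2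
--         if event_ticks[mid] < target:
--             return locate(target, mid + 1, hi)
--         return locate(target, lo, mid)
--
--     def lane(tick: int) -> list[int]:
--         cands = [event_ticks[i] for i in (locate(tick + o, 0, n) for o in offsets) if i < n]
--         return list(dict.fromkeys(c for c in cands if c > tick))
--
--     return [lane(tick) for tick in event_ticks]
-- ===== Notes on version B (the rewrite author's own statement) =====
-- stated objective: alternative
-- what changed: A hand-written recursive divide-and-conquer insertion-point search replaces the stdlib bisect_left loop, and each lane is assembled by filter/map comprehensions with dict.fromkeys ordered dedup instead of an accumulator loop with membership tests and index guards.
import Mathlib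
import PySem

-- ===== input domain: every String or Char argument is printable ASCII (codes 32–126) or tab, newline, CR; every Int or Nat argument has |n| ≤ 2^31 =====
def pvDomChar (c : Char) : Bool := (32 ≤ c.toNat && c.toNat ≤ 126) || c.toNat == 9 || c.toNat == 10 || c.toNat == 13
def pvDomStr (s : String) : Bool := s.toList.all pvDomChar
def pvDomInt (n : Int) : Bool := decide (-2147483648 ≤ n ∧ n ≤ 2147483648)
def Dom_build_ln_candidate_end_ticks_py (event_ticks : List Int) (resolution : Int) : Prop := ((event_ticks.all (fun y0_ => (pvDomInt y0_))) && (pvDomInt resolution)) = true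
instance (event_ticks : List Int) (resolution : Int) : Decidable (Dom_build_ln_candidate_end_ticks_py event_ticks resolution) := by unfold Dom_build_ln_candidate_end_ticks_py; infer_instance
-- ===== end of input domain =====

-- B restructures A: a recursive divide-and-conquer insertion-point search replaces the stdlib bisect loop, and each lane is assembled by filter/map with ordered dedup instead of an accumulator loop with membership tests (alternative decomposition, same asymptotic cost; not claimed faster).


-- ===== PORT A =====
def build_ln_candidate_end_ticks_py (event_ticks : List Int) (resolution : Int) : List (List Int) :=
  if event_ticks = [] then []
  else
    event_ticks.foldl (fun candidates_by_event tick =>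
      let candidate_targets := [tick + PySem.Int.floordiv resolution 2, tick + resolution,
                                tick + resolution * 2, tick + resolution * 4]
      let lane_candidates := candidate_targets.foldl (fun lane target =>
        let index := PySem.List.bisectLeft event_ticks target
        if event_ticks.length ≤ index then lane
        else
          let candidate_tick := event_ticks.getD index 0
          if candidate_tick > tick && !(lane.contains candidate_tick) then lane ++ [candidate_tick]
          else lane) []
      candidates_by_event ++ [lane_candidates]) []

-- ===== PORT B =====
-- Source B's recursive `locate`; lo, hi are the nonnegative Python ints, so `(lo + hi) // 2` is Nat
-- division and `event_ticks[mid]` (mid < hi ≤ n on every reachable call) is `getD mid 0` (exact there).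
def pvLocate (xs : List Int) (target : Int) (lo hi : Nat) : Nat :=
  if h : lo ≥ hi then lo
  else
    let mid := (lo + hi) / 2
    if xs.getD mid 0 < target then pvLocate xs target (mid + 1) hi
    else pvLocate xs target lo mid
termination_by hi - lo
decreasing_by all_goals omega

-- Source B's `lane`: candidate values via filter/map over the four located indices, then ordered dedup
-- (`dict.fromkeys` = PySem.List.dedup)
def pvLane (xs : List Int) (resolution tick : Int) : List Int :=
  let n := xs.length
  let cands := (([pvLocate xs (tick + PySem.Int.floordiv resolution 2) 0 n,
                  pvLocate xs (tick + resolution) 0 n,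
                  pvLocate xs (tick + resolution * 2) 0 n,
                  pvLocate xs (tick + resolution * 4) 0 n].filter (fun i => i < n)).map
                (fun i => xs.getD i 0))
  PySem.List.dedup (cands.filter (fun c => c > tick))

def build_ln_candidate_end_ticks_py_alt (event_ticks : List Int) (resolution : Int) : List (List Int) :=
  event_ticks.map (pvLane event_ticks resolution)

-- ===== PRECONDITION & SPEC =====
def Spec_build_ln_candidate_end_ticks_py (event_ticks : List Int) (resolution : Int) (out : List (List Int)) : Prop := out = build_ln_candidate_end_ticks_py_alt event_ticks resolution
instance (event_ticks : List Int) (resolution : Int) (out : List (List Int)) : Decidable (Spec_build_ln_candidate_end_ticks_py event_ticks resolution out) := by unfold Spec_build_ln_candidate_end_ticks_py; infer_instance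

-- ===== CLAIM (what is proved, stated in full; the proofs are below) =====
def Claim_equal_build_ln_candidate_end_ticks_py : Prop := ∀ (event_ticks : List Int) (resolution : Int), Dom_build_ln_candidate_end_ticks_py event_ticks resolution → Spec_build_ln_candidate_end_ticks_py event_ticks resolution (build_ln_candidate_end_ticks_py event_ticks resolution)

-- ===== LEMMAS AND PROOFS =====

-- the recursive search follows exactly the comparison path of Python's bisect_left loop
theorem pvLocate_eq_loop (xs : List Int) (x : Int) :
    ∀ (fuel lo hi : Nat), lo ≤ hi → hi ≤ xs.length → hi - lo ≤ fuel →
      pvLocate xs x lo hi = PySem.List.bisectLeftLoop xs x fuel lo hi := by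
  intro fuel
  induction fuel with
  | zero =>
    intro lo hi hlh hhn hf
    have : lo = hi := by omega
    subst this
    rw [pvLocate]
    simp [PySem.List.bisectLeftLoop]
  | succ fuel ih =>
    intro lo hi hlh hhn hf
    by_cases hlt : lo < hi
    · have hmid : (lo + hi) / 2 < xs.length := by omega
      rw [pvLocate, dif_neg (by omega)]
      have hget : xs[(lo + hi) / 2]? = some (xs.getD ((lo + hi) / 2) 0) := by
        rw [List.getElem?_eq_getElem hmid, List.getD_eq_getElem _ _ hmid]
      by_cases hc : xs.getD ((lo + hi) / 2) 0 < x
      · rw [if_pos hc]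
        show pvLocate xs x ((lo + hi) / 2 + 1) hi = _
        rw [ih ((lo + hi) / 2 + 1) hi (by omega) hhn (by omega)]
        simp only [PySem.List.bisectLeftLoop, if_pos hlt, hget, if_pos hc]
      · rw [if_neg hc]
        show pvLocate xs x lo ((lo + hi) / 2) = _
        rw [ih lo ((lo + hi) / 2) (by omega) (by omega) (by omega)]
        simp only [PySem.List.bisectLeftLoop, if_pos hlt, hget, if_neg hc]
    · rw [pvLocate, dif_pos (by omega)]
      simp [PySem.List.bisectLeftLoop, hlt]

theorem pvLocate_eq_bisectLeft (xs : List Int) (x : Int) :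
    pvLocate xs x 0 xs.length = PySem.List.bisectLeft xs x :=
  pvLocate_eq_loop xs x xs.length 0 xs.length (Nat.zero_le _) le_rfl (by omega)

-- A's append-if-new accumulation is folding PySem.Set.add over the > tick candidates
theorem pvFold_add_eq (t : Int) :
    ∀ (cs lane : List Int),
      cs.foldl (fun lane c => if c > t && !(lane.contains c) then lane ++ [c] else lane) lane =
        (cs.filter (fun c => c > t)).foldl PySem.Set.add lane := by
  intro cs
  induction cs with
  | nil => intro lane; rfl
  | cons c rest ih =>
    intro lane
    by_cases hc : c > t
    · have h1 : (if (decide (c > t) && !(lane.contains c)) = true then lane ++ [c] else lane) =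
          PySem.Set.add lane c := by
        unfold PySem.Set.add
        cases hm : lane.contains c
        · have hni : c ∉ lane := by simpa using hm
          simp [hc, hni]
        · have hin : c ∈ lane := by simpa using hm
          simp [hc, hin]
      simp only [List.foldl, List.filter_cons, decide_eq_true hc, if_true, Bool.true_and]
      rw [show (if (!lane.contains c) = true then lane ++ [c] else lane) = PySem.Set.add lane c from by
        simpa [decide_eq_true hc] using h1]
      exact ih _
    · simp only [List.foldl, List.filter_cons, Bool.false_and,
        decide_eq_false hc, Bool.false_eq_true, if_false]
      exact ih _

-- A's fold over targets is a fold over the in-range located values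
theorem pvFold_targets_eq (xs : List Int) (t : Int) :
    ∀ (gs : List Int) (lane : List Int),
      gs.foldl (fun lane target =>
        let index := PySem.List.bisectLeft xs target
        if xs.length ≤ index then lane
        else
          let candidate_tick := xs.getD index 0
          if candidate_tick > t && !(lane.contains candidate_tick) then lane ++ [candidate_tick]
          else lane) lane =
      (((gs.map (PySem.List.bisectLeft xs)).filter (fun i => i < xs.length)).map
        (fun i => xs.getD i 0)).foldl
        (fun lane c => if c > t && !(lane.contains c) then lane ++ [c] else lane) lane := by
  intro gs
  induction gs with
  | nil => intro lane; rfl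
  | cons g rest ih =>
    intro lane
    by_cases h : PySem.List.bisectLeft xs g < xs.length
    · simp only [List.foldl, List.map_cons, List.filter_cons, decide_eq_true h,
        if_neg (by omega : ¬ xs.length ≤ PySem.List.bisectLeft xs g)]
      exact ih _
    · simp only [List.foldl, List.map_cons, List.filter_cons, decide_eq_false h,
        Bool.false_eq_true, if_false, if_pos (by omega : xs.length ≤ PySem.List.bisectLeft xs g)]
      exact ih _

-- per tick, A's inner fold computes B's lane
theorem pvLaneA_eq (xs : List Int) (res t : Int) :
    ([t + PySem.Int.floordiv res 2, t + res, t + res * 2, t + res * 4].foldl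
      (fun lane target =>
        let index := PySem.List.bisectLeft xs target
        if xs.length ≤ index then lane
        else
          let candidate_tick := xs.getD index 0
          if candidate_tick > t && !(lane.contains candidate_tick) then lane ++ [candidate_tick]
          else lane) []) = pvLane xs res t := by
  rw [pvFold_targets_eq, pvFold_add_eq]
  unfold pvLane
  simp only [PySem.List.dedup, PySem.Set.ofList, List.map_cons, List.map_nil,
    pvLocate_eq_bisectLeft]
  rfl

-- ===== VERDICT (by name: the statement is the Claim_ definition above) =====
theorem build_ln_candidate_end_ticks_py_spec : Claim_equal_build_ln_candidate_end_ticks_py := by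
  intro xs res _dom
  unfold Spec_build_ln_candidate_end_ticks_py
  unfold build_ln_candidate_end_ticks_py build_ln_candidate_end_ticks_py_alt
  by_cases hx : xs = []
  · subst hx; rfl
  · rw [if_neg hx]
    have hmap := PySem.List.foldl_append_singleton_eq_map (pvLane xs res) xs []
    simp only [List.nil_append] at hmap
    refine Eq.trans (b := xs.map (pvLane xs res)) ?_ rfl
    rw [← hmap]
    refine PySem.List.foldl_congr_mem xs _ _ [] ?_
    intro lane tick _
    simp only [pvLaneA_eq]
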